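-- pv_equiv track=rewrite | github.com/TabeerMir/Theory1-foundations-of-programming | december/elfish.py | something_ish
-- ===== SOURCE A (Python) =====
-- def something_ish(word, pattern):
--     if pattern == []:
--         return True
--     elif word == '':
--         return False
--     elif pattern[0] in word:
--         word = word.replace(pattern[0],'')
--         return something_ish(word,pattern[1:])
--     else:
--         return False
-- ===== SOURCE B (Python) =====
-- def something_ish(word, pattern):
--     # Iterative fold over the pattern with an Option-like state:
--     # w is the remaining word, or None once matching has failed.
--     w = word
--     for p in pattern:
--         if w is not None and w != '' and p in w:
--             w = w.replace(p, '')
--         else: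
--             w = None
--     return w is not None
-- ===== Notes on version B (the rewrite author's own statement) =====
-- stated objective: alternative
-- what changed: Replaces the tail recursion with a single iterative fold over the pattern carrying an optional remaining-word state (None = failed), testing emptiness/membership per element instead of recursing on pattern[1:].
import Mathlib
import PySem

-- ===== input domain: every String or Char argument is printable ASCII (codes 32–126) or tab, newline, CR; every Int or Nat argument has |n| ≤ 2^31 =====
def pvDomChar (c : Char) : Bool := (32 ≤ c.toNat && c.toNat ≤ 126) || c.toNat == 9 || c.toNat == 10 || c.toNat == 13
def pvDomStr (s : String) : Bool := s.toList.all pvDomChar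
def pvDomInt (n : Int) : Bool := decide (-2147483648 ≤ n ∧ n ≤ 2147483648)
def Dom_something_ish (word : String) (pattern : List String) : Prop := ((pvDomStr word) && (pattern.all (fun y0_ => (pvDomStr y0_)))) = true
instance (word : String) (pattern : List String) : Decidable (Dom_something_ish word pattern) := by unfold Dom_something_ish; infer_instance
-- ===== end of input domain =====

-- B replaces A's tail recursion with an iterative fold over the pattern carrying an
-- optional remaining-word state (none = failed); alternative decomposition, same cost.


-- ===== PORT A =====
def something_ish (word : String) (pattern : List String) : Bool :=
  match pattern with
  | [] => true                                -- if pattern == []: return True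
  | p :: ps =>
    if word = "" then false                   -- elif word == '': return False
    else if PySem.Str.isIn p word then        -- elif pattern[0] in word:
      something_ish (PySem.Str.replace word p "") ps
    else false

-- ===== PORT B =====
-- loop body: one step of the fold over the pattern (w = None is absorbing)
def pvStep (w : Option String) (p : String) : Option String :=
  match w with
  | some s => if s ≠ "" ∧ PySem.Str.isIn p s then some (PySem.Str.replace s p "") else none
  | none => none

def something_ish_alt (word : String) (pattern : List String) : Bool :=
  (pattern.foldl pvStep (some word)).isSome

-- ===== PRECONDITION & SPEC =====
def Spec_something_ish (word : String) (pattern : List String) (out : Bool) : Prop := out = something_ish_alt word pattern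
instance (word : String) (pattern : List String) (out : Bool) : Decidable (Spec_something_ish word pattern out) := by unfold Spec_something_ish; infer_instance

-- ===== CLAIM (what is proved, stated in full; the proofs are below) =====
def Claim_equal_something_ish : Prop := ∀ (word : String) (pattern : List String), Dom_something_ish word pattern → Spec_something_ish word pattern (something_ish word pattern)

-- ===== LEMMAS AND PROOFS =====
theorem pvFoldl_none (ps : List String) : ps.foldl pvStep none = none := by
  induction ps with
  | nil => rfl
  | cons p ps ih => simpa [pvStep] using ih

theorem pvMain (pattern : List String) (word : String) :
    something_ish word pattern = something_ish_alt word pattern := by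
  induction pattern generalizing word with
  | nil => rfl
  | cons p ps ih =>
    by_cases hw : word = ""
    · simp [something_ish, something_ish_alt, hw, pvStep, pvFoldl_none]
    · by_cases hin : PySem.Chars.isIn p.toList word.toList
      · simpa [something_ish, something_ish_alt, hw, hin, pvStep] using
          ih (PySem.Str.replace word p "")
      · simp [something_ish, something_ish_alt, hw, hin, pvStep, pvFoldl_none]

-- ===== VERDICT (by name: the statement is the Claim_ definition above) =====
theorem something_ish_spec : Claim_equal_something_ish := by
  intro word pattern _
  exact pvMain pattern word
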